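-- pv_equiv track=rewrite | github.com/SamuelHudec/ai-operations-admin | skills/loggify-me/scripts/suggest_clockify_logs.py | _pick_window
-- ===== SOURCE A (Python) =====
-- def _pick_window(
--     windows: list[tuple[int, int]],
--     min_block_minutes: int,
--     min_entry_minutes: int,
--     prefer_large_block: bool = False,
-- ) -> tuple[int, int] | None:
--     usable = [
--         window
--         for window in windows
--         if (window[1] - window[0]) >= min_block_minutes
--         or (window[1] - window[0]) >= min_entry_minutes
--     ]
--     if not usable:
--         return None
--     if prefer_large_block:
--         return max(usable, key=lambda window: window[1] - window[0])
--     return usable[0]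
-- ===== SOURCE B (Python) =====
-- def _pick_window(
--     windows,
--     min_block_minutes,
--     min_entry_minutes,
--     prefer_large_block=False,
-- ):
--     # A window qualifies iff its size meets min(min_block_minutes, min_entry_minutes).
--     # Choose a visiting order up front: original order normally, or a STABLE sort by
--     # descending size when prefer_large_block (stability reproduces max's first-of-ties);
--     # then the answer is simply the first qualifying window in that order.
--     threshold = min(min_block_minutes, min_entry_minutes)
--     order = sorted(windows, key=lambda w: w[0] - w[1]) if prefer_large_block else windows
--     return next((w for w in order if w[1] - w[0] >= threshold), None)
-- ===== Notes on version B (the rewrite author's own statement) =====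
-- stated objective: alternative
-- what changed: B collapses the OR into a single min(min_block,min_entry) threshold and picks the FIRST qualifying window of a visiting order chosen up front: original order normally, or a stable sort by descending size when prefer_large_block (stability reproduces max's first-of-ties), replacing A's filter-list plus max/index.
import Mathlib
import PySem

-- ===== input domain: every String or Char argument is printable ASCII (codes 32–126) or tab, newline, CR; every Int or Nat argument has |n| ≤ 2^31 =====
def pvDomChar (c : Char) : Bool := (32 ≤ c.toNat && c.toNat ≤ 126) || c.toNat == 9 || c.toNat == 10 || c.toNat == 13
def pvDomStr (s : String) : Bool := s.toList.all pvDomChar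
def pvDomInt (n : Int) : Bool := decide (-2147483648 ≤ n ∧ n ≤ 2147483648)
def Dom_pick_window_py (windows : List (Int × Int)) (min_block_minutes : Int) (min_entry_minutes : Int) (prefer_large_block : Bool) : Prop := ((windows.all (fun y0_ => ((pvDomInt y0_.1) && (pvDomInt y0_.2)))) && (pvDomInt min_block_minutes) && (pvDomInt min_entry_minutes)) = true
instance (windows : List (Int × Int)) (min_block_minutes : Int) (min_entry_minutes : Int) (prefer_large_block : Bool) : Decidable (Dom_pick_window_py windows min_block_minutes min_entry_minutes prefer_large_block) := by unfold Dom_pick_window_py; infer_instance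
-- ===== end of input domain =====

-- B replaces A's filter-then-max/index with: one min() threshold, a stable descending-size sort
-- when prefer_large_block, and "first qualifying window" of that order; same return values.

-- ===== PORT A =====
-- Python's max(usable, key=size) ported by hand as a left fold keeping the FIRST maximal
-- element (Python updates only on strictly greater key) — exact.
def pyMaxBySize (h : Int × Int) (t : List (Int × Int)) : Int × Int :=
  t.foldl (fun best w => if w.2 - w.1 > best.2 - best.1 then w else best) h

def pick_window_py (windows : List (Int × Int)) (min_block_minutes : Int) (min_entry_minutes : Int) (prefer_large_block : Bool) : Option (Int × Int) :=
  let usable := windows.filter (fun w =>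
    decide (w.2 - w.1 ≥ min_block_minutes) || decide (w.2 - w.1 ≥ min_entry_minutes))
  match usable with
  | [] => none
  | h :: t => if prefer_large_block then some (pyMaxBySize h t) else some h

-- ===== PORT B =====
def pick_window_py_alt (windows : List (Int × Int)) (min_block_minutes : Int) (min_entry_minutes : Int) (prefer_large_block : Bool) : Option (Int × Int) :=
  let threshold := min min_block_minutes min_entry_minutes
  let order := if prefer_large_block then PySem.List.sorted windows (fun w => w.1 - w.2) false else windows
  order.find? (fun w => decide (w.2 - w.1 ≥ threshold))

-- ===== PRECONDITION & SPEC =====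
def Spec_pick_window_py (windows : List (Int × Int)) (min_block_minutes : Int) (min_entry_minutes : Int) (prefer_large_block : Bool) (out : Option (Int × Int)) : Prop := out = pick_window_py_alt windows min_block_minutes min_entry_minutes prefer_large_block
instance (windows : List (Int × Int)) (min_block_minutes : Int) (min_entry_minutes : Int) (prefer_large_block : Bool) (out : Option (Int × Int)) : Decidable (Spec_pick_window_py windows min_block_minutes min_entry_minutes prefer_large_block out) := by unfold Spec_pick_window_py; infer_instance

-- ===== CLAIM (what is proved, stated in full; the proofs are below) =====
def Claim_equal_pick_window_py : Prop := ∀ (windows : List (Int × Int)) (min_block_minutes : Int) (min_entry_minutes : Int) (prefer_large_block : Bool), Dom_pick_window_py windows min_block_minutes min_entry_minutes prefer_large_block → Spec_pick_window_py windows min_block_minutes min_entry_minutes prefer_large_block (pick_window_py windows min_block_minutes min_entry_minutes prefer_large_block)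

-- ===== LEMMAS AND PROOFS =====

-- the sort key B uses: ascending in start-end = descending in window size
def szKey (w : Int × Int) : Int := w.1 - w.2

-- insertion step of PySem's stable insertion sort, at B's key
def insW (x : Int × Int) (s : List (Int × Int)) : List (Int × Int) :=
  PySem.List.insertBy (fun a b => decide (szKey a < szKey b)) x s

theorem sorted_append_singleton (l : List (Int × Int)) (x : Int × Int) :
    PySem.List.sorted (l ++ [x]) szKey false = insW x (PySem.List.sorted l szKey false) := by
  rw [PySem.List.sorted_eq_foldl_insertBy, PySem.List.sorted_eq_foldl_insertBy, List.foldl_append]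
  rfl

theorem insW_cons (x y : Int × Int) (ys : List (Int × Int)) :
    insW x (y :: ys) = if szKey x < szKey y then x :: y :: ys else y :: insW x ys := by
  simp [insW, PySem.List.insertBy]

theorem insW_of_lt_all (x : Int × Int) (s : List (Int × Int))
    (h : ∀ z ∈ s, szKey x < szKey z) : insW x s = x :: s := by
  cases s with
  | nil => rfl
  | cons z zs => rw [insW_cons, if_pos (h z (by simp))]

theorem filter_insW_neg (p : Int × Int → Bool) (x : Int × Int) (s : List (Int × Int))
    (hp : p x = false) : (insW x s).filter p = s.filter p := by
  induction s with
  | nil => simp [insW, PySem.List.insertBy, hp]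
  | cons y ys ih =>
    rw [insW_cons]
    split_ifs with h
    · simp [hp]
    · simp [List.filter_cons, ih]

theorem filter_insW_pos (p : Int × Int → Bool) (x : Int × Int) (s : List (Int × Int))
    (hp : p x = true) (hs : s.Pairwise (fun a b => szKey a ≤ szKey b)) :
    (insW x s).filter p = insW x (s.filter p) := by
  induction s with
  | nil => simp [insW, PySem.List.insertBy, hp]
  | cons y ys ih =>
    rcases List.pairwise_cons.mp hs with ⟨hy, hys⟩
    rw [insW_cons]
    split_ifs with h
    · -- x goes right before y
      by_cases hpy : p y = true
      · simp [hp, hpy, insW_cons, h]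
      · rw [List.filter_cons_of_pos hp]
        refine (insW_of_lt_all x _ ?_).symm
        intro z hz
        have hz2 : p z = true := List.of_mem_filter hz
        rcases List.mem_cons.mp (List.mem_of_mem_filter hz) with rfl | hzys
        · exact absurd hz2 (by simpa using hpy)
        · exact lt_of_lt_of_le h (hy z hzys)
    · by_cases hpy : p y = true
      · rw [List.filter_cons_of_pos hpy, List.filter_cons_of_pos hpy, insW_cons, if_neg h,
          ih hys]
      · rw [List.filter_cons_of_neg (by simp [hpy]), List.filter_cons_of_neg (by simp [hpy]),
          ih hys]

theorem filter_sorted (p : Int × Int → Bool) (l : List (Int × Int)) :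
    (PySem.List.sorted l szKey false).filter p = PySem.List.sorted (l.filter p) szKey false := by
  induction l using List.reverseRecOn with
  | nil => rfl
  | append_singleton l x ih =>
    rw [sorted_append_singleton, List.filter_append]
    by_cases hp : p x = true
    · rw [filter_insW_pos p x _ hp (PySem.List.sorted_pairwise l szKey), ih,
        show [x].filter p = [x] from by simp [hp], sorted_append_singleton]
    · rw [filter_insW_neg p x _ (by simpa using hp), ih,
        show [x].filter p = [] from by simp [Bool.not_eq_true] at hp; simp [hp], List.append_nil]

theorem head_sorted_eq_max (l : List (Int × Int)) :
    (PySem.List.sorted l szKey false).head? =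
      (match l with | [] => none | h :: t => some (pyMaxBySize h t)) := by
  induction l using List.reverseRecOn with
  | nil => rfl
  | append_singleton l x ih =>
    rw [sorted_append_singleton]
    cases l with
    | nil => rfl
    | cons h t =>
      -- sorted (h :: t) is nonempty; name its head m
      rcases hs : PySem.List.sorted (h :: t) szKey false with _ | ⟨m, s⟩
      · exact absurd ((PySem.List.sorted_eq_nil_iff (h :: t) szKey false).mp hs) (by simp)
      · rw [hs] at ih
        have hm : m = pyMaxBySize h t := by simpa using ih
        rw [insW_cons]
        have hfold : pyMaxBySize h (t ++ [x]) =
            if x.2 - x.1 > m.2 - m.1 then x else m := by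
          simp [pyMaxBySize, List.foldl_append, hm, pyMaxBySize]
        split_ifs with hlt
        · have hsz : x.2 - x.1 > m.2 - m.1 := by simp [szKey] at hlt; omega
          simp [hfold, hsz]
        · have hsz : ¬(x.2 - x.1 > m.2 - m.1) := by simp [szKey] at hlt; omega
          simp [hfold, hsz]

-- A's OR-test equals B's min-threshold test
theorem pred_eq (mb me : Int) :
    (fun w : Int × Int => decide (w.2 - w.1 ≥ mb) || decide (w.2 - w.1 ≥ me)) =
      (fun w : Int × Int => decide (w.2 - w.1 ≥ min mb me)) := by
  funext w
  rw [show (decide (w.2 - w.1 ≥ min mb me)) = decide (w.2 - w.1 ≥ mb ∨ w.2 - w.1 ≥ me) from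
    decide_eq_decide.mpr (by omega)]
  simp

-- ===== VERDICT (by name: the statement is the Claim_ definition above) =====
theorem pick_window_py_spec : Claim_equal_pick_window_py := by
  intro windows mb me prefer _
  unfold Spec_pick_window_py pick_window_py pick_window_py_alt
  have hpred := pred_eq mb me
  have hkey : (fun w : Int × Int => w.1 - w.2) = szKey := rfl
  cases prefer <;>
    simp only [hpred, hkey, Bool.false_eq_true, if_false, if_true]
  · rw [← List.head?_filter]
    cases windows.filter (fun w => decide (w.2 - w.1 ≥ min mb me)) <;> simp
  · rw [← List.head?_filter, filter_sorted, head_sorted_eq_max]
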